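-- pv_equiv track=rewrite | github.com/Jakub-Woszczek/Algorithms-and-Data-Structures-AGH-CS-Course- | Egzaminy/2021_2022/EGZ 1/A/Templatka/egz1a.py | snow
-- ===== SOURCE A (Python) =====
-- def snow( S ):
--     S.sort()
--     S.reverse()
--     suma = 0
--
--     for i in range(len(S)):
--         suma = suma + S[i] - i if S[i] - i > 0 else suma
--
--     return suma
--     return -1
-- ===== SOURCE B (Python) =====
-- def snow(S):
--     S.sort(reverse=True)
--     k = 0
--     n = len(S)
--     while k < n and S[k] - k > 0:
--         k += 1
--     return sum(S[:k]) - k * (k - 1) // 2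
-- ===== Notes on version B (the rewrite author's own statement) =====
-- stated objective: alternative
-- what changed: Instead of scanning every index and conditionally accumulating S[i]-i, B locates k, the length of the positive prefix of the strictly decreasing sequence S[i]-i (early-stopping scan), and returns sum(S[:k]) minus the arithmetic-series closed form k*(k-1)//2.
import Mathlib
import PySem

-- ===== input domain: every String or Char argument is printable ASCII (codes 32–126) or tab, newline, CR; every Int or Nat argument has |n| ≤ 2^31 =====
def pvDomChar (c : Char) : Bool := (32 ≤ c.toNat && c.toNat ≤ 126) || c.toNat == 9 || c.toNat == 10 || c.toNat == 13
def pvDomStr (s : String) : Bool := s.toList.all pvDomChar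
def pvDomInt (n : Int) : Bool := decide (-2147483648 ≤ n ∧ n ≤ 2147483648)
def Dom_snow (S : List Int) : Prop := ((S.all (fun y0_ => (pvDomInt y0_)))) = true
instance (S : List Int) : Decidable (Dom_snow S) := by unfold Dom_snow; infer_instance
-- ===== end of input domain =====

-- B replaces A's full-scan conditional accumulation by an early-stopping positive-prefix
-- scan plus the arithmetic-series closed form (alternative decomposition, same cost).
-- Both Pythons sort S in place (same mutation); the theorems are about the return value.

-- ===== PORT A =====
def snow (S : List Int) : Int :=
  let T := (PySem.List.sorted S (fun x => x) false).reverse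
  (PySem.List.pyRange 0 (PySem.List.len T) 1).foldl
    (fun suma i =>
      if PySem.List.pyGetD T i 0 - i > 0 then suma + PySem.List.pyGetD T i 0 - i else suma) 0

-- ===== PORT B =====
-- the 'while k < n and S[k] - k > 0: k += 1' loop, walking the suffix of S at index k
def snowAltLoop : List Int → Int → Int
  | [], k => k
  | x :: rest, k => if x - k > 0 then snowAltLoop rest (k + 1) else k

def snow_alt (S : List Int) : Int :=
  let T := PySem.List.sorted S (fun x => x) true
  let k := snowAltLoop T 0
  (PySem.List.slice T none (some k)).sum - PySem.Int.floordiv (k * (k - 1)) 2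

-- ===== PRECONDITION & SPEC =====
def Spec_snow (S : List Int) (out : Int) : Prop := out = snow_alt S
instance (S : List Int) (out : Int) : Decidable (Spec_snow S out) := by unfold Spec_snow; infer_instance

-- ===== CLAIM (what is proved, stated in full; the proofs are below) =====
def Claim_equal_snow : Prop := ∀ (S : List Int), Dom_snow S → Spec_snow S (snow S)

-- ===== LEMMAS AND PROOFS =====

-- A's loop as a structural recursion over the (list, running index) pair
def foldA : List Int → Int → Int → Int
  | [], _, c => c
  | x :: t, i, c => foldA t (i + 1) (if x - i > 0 then c + x - i else c)

theorem foldA_eq_enum (T : List Int) (i c : Int) :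
    (PySem.List.enumerate T i).foldl
      (fun suma p => if p.2 - p.1 > 0 then suma + p.2 - p.1 else suma) c = foldA T i c := by
  induction T generalizing i c with
  | nil => simp [PySem.List.enumerate_nil, foldA]
  | cons x t ih =>
    rw [PySem.List.enumerate_cons, List.foldl_cons, foldA, ih]

theorem snow_eq_foldA (S : List Int) :
    snow S = foldA ((PySem.List.sorted S (fun x => x) false).reverse) 0 0 := by
  unfold snow
  rw [← foldA_eq_enum]
  rw [PySem.List.enumerate_eq_map_pyRange _ 0, List.foldl_map]

theorem sorted_rev_eq (S : List Int) :
    (PySem.List.sorted S (fun x => x) false).reverse = PySem.List.sorted S (fun x => x) true := by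
  have h1 : ((PySem.List.sorted S (fun x => x) false).reverse).Pairwise (fun a b : Int => b ≤ a) := by
    rw [List.pairwise_reverse]
    exact PySem.List.sorted_pairwise S (fun x => x)
  have h2 : (PySem.List.sorted S (fun x => x) true).Pairwise (fun a b : Int => b ≤ a) :=
    PySem.List.sorted_pairwise_rev S (fun x => x)
  have hp : ((PySem.List.sorted S (fun x => x) false).reverse).Perm
      (PySem.List.sorted S (fun x => x) true) :=
    ((List.reverse_perm _).trans (PySem.List.sorted_perm S (fun x => x) false)).trans
      (PySem.List.sorted_perm S (fun x => x) true).symm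
  exact hp.eq_of_pairwise (fun a b _ _ hab hba => le_antisymm hba hab) h1 h2

theorem snowAltLoop_ge (t : List Int) (i : Int) : i ≤ snowAltLoop t i := by
  induction t generalizing i with
  | nil => simp [snowAltLoop]
  | cons x r ih =>
    simp only [snowAltLoop]
    split
    · exact le_trans (by omega) (ih (i + 1))
    · omega

theorem foldA_const (t : List Int) (x i c : Int) (hall : ∀ y ∈ t, y ≤ x) (hx : x ≤ i) :
    foldA t (i + 1) c = c := by
  induction t generalizing i c with
  | nil => rfl
  | cons y r ih =>
    have hy : y ≤ x := hall y (by simp)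
    simp only [foldA, if_neg (by omega : ¬ y - (i + 1) > 0)]
    exact ih (i + 1) c (fun z hz => hall z (List.mem_cons_of_mem _ hz)) (by omega)

-- core invariant: on a nonincreasing list, A's loop equals prefix-sum minus index-series
theorem foldA_closed (T : List Int) (hT : T.Pairwise (fun a b : Int => b ≤ a)) :
    ∀ (i c : Int),
      2 * foldA T i c =
        2 * c + 2 * (T.take (snowAltLoop T i - i).toNat).sum
          - (snowAltLoop T i * (snowAltLoop T i - 1) - i * (i - 1)) := by
  induction T with
  | nil => intro i c; simp [foldA, snowAltLoop]
  | cons x t ih =>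
    intro i c
    rcases List.pairwise_cons.mp hT with ⟨hall, ht⟩
    by_cases hx : x - i > 0
    · simp only [foldA, snowAltLoop, if_pos hx]
      have _hk := snowAltLoop_ge t (i + 1)
      have htoNat : (snowAltLoop t (i + 1) - i).toNat = (snowAltLoop t (i + 1) - (i + 1)).toNat + 1 := by
        omega
      rw [htoNat, List.take_succ_cons, List.sum_cons, ih ht (i + 1) (c + x - i)]
      ring
    · simp only [foldA, snowAltLoop, if_neg hx]
      rw [foldA_const t x i _ hall (by omega)]
      simp

theorem two_mul_floordiv (k : Int) (_hk : 0 ≤ k) :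
    2 * PySem.Int.floordiv (k * (k - 1)) 2 = k * (k - 1) := by
  rw [PySem.Int.floordiv_eq_ediv_of_pos (by norm_num)]
  have he : Even (k * (k - 1)) := Int.even_mul_pred_self k
  rcases he with ⟨m, hm⟩
  omega

-- ===== VERDICT (by name: the statement is the Claim_ definition above) =====
theorem snow_spec : Claim_equal_snow := by
  intro S _
  unfold Spec_snow snow_alt
  rw [snow_eq_foldA, sorted_rev_eq]
  set T := PySem.List.sorted S (fun x => x) true with hT
  show foldA T 0 0 = (PySem.List.slice T none (some (snowAltLoop T 0))).sum
      - PySem.Int.floordiv (snowAltLoop T 0 * (snowAltLoop T 0 - 1)) 2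
  have hpw : T.Pairwise (fun a b : Int => b ≤ a) := PySem.List.sorted_pairwise_rev S (fun x => x)
  have h := foldA_closed T hpw 0 0
  have hk0 : (0 : Int) ≤ snowAltLoop T 0 := snowAltLoop_ge T 0
  rw [PySem.List.slice_to _ hk0]
  have hf := two_mul_floordiv (snowAltLoop T 0) hk0
  simp only [sub_zero] at h
  omega
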